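-- pv_equiv track=rewrite | github.com/ollieSandbox/pyBenchmarker | example_benchmarker.py | lazyEnumerate
-- ===== SOURCE A (Python) =====
-- def lazyEnumerate(input):
-- 	previous_value = None
-- 	new_lst = []
-- 	for i, elem in enumerate(input):
-- 	   if elem != previous_value:
-- 		   new_lst.append(i)
-- 		   previous_value = elem
-- 	if len(new_lst) > 0:
-- 		i = len(new_lst) - 1
-- 		while i > 0:
-- 			input.pop(new_lst[i])
-- 			i -= 1
-- 	return input
-- ===== SOURCE B (Python) =====
-- def lazyEnumerate(input):
-- 	# One pass: keep the first element, then keep each element equal to its predecessor.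
-- 	# Mutates input in place (like A) and returns it.
-- 	out = input[:1]
-- 	for prev, elem in zip(input, input[1:]):
-- 		if elem == prev:
-- 			out.append(elem)
-- 	input[:] = out
-- 	return input
-- ===== Notes on version B (the rewrite author's own statement) =====
-- stated objective: faster
-- what changed: Replaced the two-phase index-collection plus descending in-place pops (each pop shifts the tail) with a single forward pass over adjacent pairs that builds the result directly.
import Mathlib
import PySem

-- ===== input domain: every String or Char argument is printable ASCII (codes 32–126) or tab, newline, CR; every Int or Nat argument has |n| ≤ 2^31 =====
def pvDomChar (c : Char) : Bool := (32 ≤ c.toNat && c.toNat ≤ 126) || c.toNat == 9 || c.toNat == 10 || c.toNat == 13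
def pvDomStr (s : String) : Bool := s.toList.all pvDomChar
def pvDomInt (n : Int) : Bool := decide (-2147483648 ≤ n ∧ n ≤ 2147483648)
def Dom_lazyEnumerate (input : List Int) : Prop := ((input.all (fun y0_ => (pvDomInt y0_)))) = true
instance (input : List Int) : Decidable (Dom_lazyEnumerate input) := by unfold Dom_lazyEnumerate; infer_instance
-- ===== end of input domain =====

-- B replaces A's two-phase "collect run-start indices, then pop them in descending order"
-- with a single forward pass over adjacent pairs; same return value (and same final list
-- contents of the mutated argument) on every input.


-- ===== PORT A =====
-- input.pop(j): pop? returns none only on an out-of-range index (IndexError);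
-- A's indices are always in range, the 'none => lst' arm only totalizes the match.
def pvPopStep (lst : List Int) (j : Int) : List Int :=
  match PySem.List.pop? lst j with
  | some r => r.2
  | none => lst

-- while i > 0: input.pop(new_lst[i]); i -= 1
def pvPopLoop (lst : List Int) (newLst : List Int) (i : Nat) : List Int :=
  match i with
  | 0 => lst
  | Nat.succ k => pvPopLoop (pvPopStep lst (PySem.List.pyGetD newLst (((k + 1 : Nat) : Int)) 0)) newLst k

def lazyEnumerate (input : List Int) : List Int :=
  let st := (PySem.List.enumerate input).foldl
    (fun (st : Option Int × List Int) p =>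
      if some p.2 ≠ st.1 then (some p.2, st.2 ++ [p.1]) else st)
    (none, ([] : List Int))
  let newLst := st.2
  if newLst.length > 0 then pvPopLoop input newLst (newLst.length - 1) else input

-- ===== PORT B =====
def lazyEnumerate_alt (input : List Int) : List Int :=
  (input.zip input.tail).foldl
    (fun out p => if p.2 = p.1 then out ++ [p.2] else out)
    (input.take 1)

-- ===== PRECONDITION & SPEC =====
def Spec_lazyEnumerate (input : List Int) (out : List Int) : Prop := out = lazyEnumerate_alt input
instance (input : List Int) (out : List Int) : Decidable (Spec_lazyEnumerate input out) := by unfold Spec_lazyEnumerate; infer_instance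

-- ===== CLAIM (what is proved, stated in full; the proofs are below) =====
def Claim_equal_lazyEnumerate : Prop := ∀ (input : List Int), Dom_lazyEnumerate input → Spec_lazyEnumerate input (lazyEnumerate input)

-- ===== LEMMAS AND PROOFS =====

-- Common reference: keep the elements of t equal to their predecessor (p = preceding value).
def keepRuns (p : Int) : List Int → List Int
  | [] => []
  | x :: xs => if x = p then x :: keepRuns p xs else keepRuns x xs

-- Run-change indices of t, starting at position s, previous value p.
def chIdx (p : Int) (s : Int) : List Int → List Int
  | [] => []
  | x :: xs => if x = p then chIdx p (s + 1) xs else s :: chIdx x (s + 1) xs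

-- Right fold of pops (rightmost index is popped first, like A's descending while-loop).
def gPops (lst : List Int) (js : List Int) : List Int :=
  js.foldr (fun j acc => pvPopStep acc j) lst

theorem altFold (xs : List Int) : ∀ (x : Int) (acc : List Int),
    ((x :: xs).zip xs).foldl (fun out p => if p.2 = p.1 then out ++ [p.2] else out) acc
      = acc ++ keepRuns x xs := by
  induction xs with
  | nil => intro x acc; simp [keepRuns]
  | cons y r ih =>
    intro x acc
    simp only [List.zip_cons_cons, List.foldl_cons]
    by_cases h : y = x
    · rw [if_pos h, ih, h]
      simp [keepRuns]
    · rw [if_neg h, ih]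
      simp [keepRuns, h]

theorem loop1 (t : List Int) : ∀ (s : Int) (p : Int) (acc : List Int),
    ((PySem.List.enumerate t s).foldl
      (fun (st : Option Int × List Int) p =>
        if some p.2 ≠ st.1 then (some p.2, st.2 ++ [p.1]) else st)
      (some p, acc)).2 = acc ++ chIdx p s t := by
  induction t with
  | nil => intro s p acc; simp [PySem.List.enumerate_nil, chIdx]
  | cons x xs ih =>
    intro s p acc
    rw [PySem.List.enumerate_cons]
    simp only [List.foldl_cons]
    by_cases h : x = p
    · subst h
      rw [if_neg (by simp)]
      rw [show chIdx x s (x :: xs) = chIdx x (s + 1) xs from by simp [chIdx]]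
      exact ih (s + 1) x acc
    · rw [if_pos (by simpa using h)]
      rw [ih (s + 1) x (acc ++ [s])]
      simp [chIdx, h]

theorem eraseIdx_append_middle (pre : List Int) (x : Int) (L : List Int) :
    (pre ++ x :: L).eraseIdx pre.length = pre ++ L := by
  induction pre with
  | nil => simp
  | cons a pre ih => simp [ih]

theorem popStep_middle (pre : List Int) (x : Int) (L : List Int) :
    pvPopStep (pre ++ x :: L) ((pre.length : Int)) = pre ++ L := by
  have hlt : pre.length < (pre ++ x :: L).length := by simp
  simp only [pvPopStep, PySem.List.pop?_natCast (pre ++ x :: L) pre.length hlt]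
  simp [eraseIdx_append_middle]

theorem gPops_spec (t : List Int) : ∀ (p : Int) (pre : List Int),
    gPops (pre ++ t) (chIdx p (pre.length : Int) t) = pre ++ keepRuns p t := by
  induction t with
  | nil => intro p pre; simp [gPops, chIdx, keepRuns]
  | cons x xs ih =>
    intro p pre
    by_cases h : x = p
    · subst h
      rw [show chIdx x (pre.length : Int) (x :: xs) = chIdx x ((pre.length : Int) + 1) xs from by
            simp [chIdx],
          show keepRuns x (x :: xs) = x :: keepRuns x xs from by simp [keepRuns],
          show ((pre.length : Int) + 1) = (((pre.length + 1 : Nat)) : Int) by push_cast; ring]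
      have := ih x (pre ++ [x])
      simp only [List.append_assoc, List.singleton_append, List.length_append,
        List.length_singleton] at this
      rw [this]
    · have hx := ih x (pre ++ [x])
      simp only [List.append_assoc, List.singleton_append, List.length_append,
        List.length_singleton] at hx
      rw [show chIdx p (pre.length : Int) (x :: xs)
            = (pre.length : Int) :: chIdx x ((pre.length : Int) + 1) xs from by simp [chIdx, h],
          show keepRuns p (x :: xs) = keepRuns x xs from by simp [keepRuns, h]]
      unfold gPops
      rw [List.foldr_cons]
      have : (chIdx x ((pre.length : Int) + 1) xs).foldr (fun j acc => pvPopStep acc j) (pre ++ x :: xs)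
          = pre ++ x :: keepRuns x xs := by
        rw [show ((pre.length : Int) + 1) = (((pre.length + 1 : Nat)) : Int) by push_cast; ring]
        exact hx
      rw [this, popStep_middle]

theorem popLoop_gPops : ∀ (i : Nat) (nl lst : List Int), i < nl.length →
    pvPopLoop lst nl i = gPops lst ((nl.drop 1).take i) := by
  intro i
  induction i with
  | zero => intro nl lst _; simp [pvPopLoop, gPops]
  | succ k ih =>
    intro nl lst h
    have hk : k < (nl.drop 1).length := by simp; omega
    have hd : (nl.drop 1).take (k + 1) = (nl.drop 1).take k ++ [(nl.drop 1)[k]] :=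
      List.take_succ_eq_append_getElem hk
    have hidx : PySem.List.pyGetD nl (((k + 1 : Nat) : Int)) 0 = nl[k + 1]'h := by
      rw [PySem.List.pyGetD_natCast]
      exact List.getD_eq_getElem nl 0 h
    show pvPopLoop (pvPopStep lst (PySem.List.pyGetD nl (((k + 1 : Nat) : Int)) 0)) nl k = _
    rw [hidx, ih nl _ (by omega), hd]
    unfold gPops
    rw [List.foldr_append]
    simp

theorem lazyEnumerate_eq_keepRuns (h : Int) (t : List Int) :
    lazyEnumerate (h :: t) = h :: keepRuns h t := by
  unfold lazyEnumerate
  rw [PySem.List.enumerate_cons]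
  simp only [List.foldl_cons]
  have hstep : (if some h ≠ (none : Option Int) then ((some h : Option Int), ([] : List Int) ++ [(0 : Int)]) else (none, ([] : List Int)))
      = (some h, [(0 : Int)]) := by simp
  rw [hstep]
  have h1 := loop1 t (0 + 1) h [(0 : Int)]
  rw [h1]
  have hlen : ([(0 : Int)] ++ chIdx h (0 + 1) t).length = (chIdx h (0+1) t).length + 1 := by
    simp
  simp only [hlen, Nat.add_sub_cancel, if_pos (Nat.succ_pos _)]
  have hdrop : (([(0 : Int)] ++ chIdx h (0 + 1) t).drop 1) = chIdx h (0 + 1) t := by simp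
  rw [popLoop_gPops _ _ _ (by simp), hdrop, List.take_length]
  have := gPops_spec t h [h]
  simpa using this

theorem alt_eq_keepRuns (h : Int) (t : List Int) :
    lazyEnumerate_alt (h :: t) = h :: keepRuns h t := by
  unfold lazyEnumerate_alt
  simp only [List.tail_cons]
  rw [show (h :: t).take 1 = [h] from rfl, altFold]
  simp

-- ===== VERDICT (by name: the statement is the Claim_ definition above) =====
theorem lazyEnumerate_spec : Claim_equal_lazyEnumerate := by
  intro input _
  unfold Spec_lazyEnumerate
  cases input with
  | nil => rfl
  | cons h t => rw [lazyEnumerate_eq_keepRuns, alt_eq_keepRuns]
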